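-- pv_equiv track=rewrite | github.com/n4rly-boop/S26-NLP-Tokenization-for-Noisy-Texts | src/preprocess.py | asr_truecase
-- ===== SOURCE A (Python) =====
-- from typing import Dict, List, Optional
--
-- _TRUECASE_DICT: Dict[str, str] = {}
--
-- def asr_truecase(tokens: List[str], mapping: Optional[Dict[str, str]] = None) -> List[str]:
--     """
--     Restore casing from CoNLL-train dict.
--
--     - Lookup lower(tok); if hit, use stored cased form.
--     - Else keep token as-is (already lowercase after ASR noise pass).
--     - Sentence-initial heuristic: if first alpha token has no lookup hit, Title-case it.
--     """
--     m = mapping if mapping is not None else _TRUECASE_DICT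
--
--     out: List[str] = []
--     first_alpha_done = False
--     for tok in tokens:
--         if not tok:
--             out.append(tok)
--             continue
--
--         low = tok.lower()
--         if low in m:
--             out.append(m[low])
--         else:
--             if not first_alpha_done and any(c.isalpha() for c in tok):
--                 out.append(tok[:1].upper() + tok[1:])
--             else:
--                 out.append(tok)
--
--         if not first_alpha_done and any(c.isalpha() for c in tok):
--             first_alpha_done = True
--
--     assert len(out) == len(tokens)
--     return out
-- ===== SOURCE B (Python) =====
-- from typing import Dict, List, Optional
--
-- _TRUECASE_DICT: Dict[str, str] = {}
--
-- def asr_truecase(tokens: List[str], mapping: Optional[Dict[str, str]] = None) -> List[str]: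
--     """Stateless map, then a single post-patch of the first alphabetic token."""
--     m = mapping if mapping is not None else _TRUECASE_DICT
--     res = [m.get(t.lower(), t) if t else t for t in tokens]
--     hit = next(((i, t) for i, t in enumerate(tokens)
--                 if any(c.isalpha() for c in t)), None)
--     if hit is not None:
--         i, t = hit
--         if t.lower() not in m:
--             res[i] = t[:1].upper() + t[1:]
--     return res
-- ===== Notes on version B (the rewrite author's own statement) =====
-- stated objective: simpler
-- what changed: Replaced A's stateful single pass with a first_alpha_done flag by a stateless dictionary-lookup map over all tokens followed by one post-patch: the first alphabetic token, if it missed the dictionary, is overwritten in place with its title-cased form.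
import Mathlib
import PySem

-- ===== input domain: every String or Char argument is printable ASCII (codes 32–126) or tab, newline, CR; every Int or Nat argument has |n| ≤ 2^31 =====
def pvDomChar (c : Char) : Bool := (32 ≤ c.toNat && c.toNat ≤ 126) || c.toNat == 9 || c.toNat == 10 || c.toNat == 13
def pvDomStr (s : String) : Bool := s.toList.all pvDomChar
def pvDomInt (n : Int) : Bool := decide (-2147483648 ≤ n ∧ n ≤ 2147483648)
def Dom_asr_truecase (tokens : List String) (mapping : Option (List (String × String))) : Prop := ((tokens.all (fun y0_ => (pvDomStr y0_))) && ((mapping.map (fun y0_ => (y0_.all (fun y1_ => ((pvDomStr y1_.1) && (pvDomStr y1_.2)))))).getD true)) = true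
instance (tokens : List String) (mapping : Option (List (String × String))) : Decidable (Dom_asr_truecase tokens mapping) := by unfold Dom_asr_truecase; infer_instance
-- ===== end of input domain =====

-- B replaces A's stateful pass (running first_alpha_done flag) by a stateless
-- lookup map plus one post-patch of the first alphabetic token. Objective: simpler.

-- any(c.isalpha() for c in tok)
def pvHasAlpha (s : String) : Bool := s.toList.any PySem.Chars.isalpha

-- tok[:1].upper() + tok[1:]
def pvTitle (tok : String) : String :=
  String.ofList (PySem.Chars.upper (PySem.Chars.slice tok.toList none (some 1)) ++
                 PySem.Chars.slice tok.toList (some 1) none)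

-- ===== PORT A =====
-- the for-loop of A, with its running flag
def asr_truecase_loop (m : PySem.Dict String String) : List String → Bool → List String
  | [], _ => []
  | tok :: rest, flag =>
    if tok = "" then tok :: asr_truecase_loop m rest flag
    else
      (match m.get? (PySem.Str.lower tok) with
       | some v => v
       | none => if !flag && pvHasAlpha tok then pvTitle tok else tok) ::
      asr_truecase_loop m rest (if !flag && pvHasAlpha tok then true else flag)

def asr_truecase (tokens : List String) (mapping : Option (List (String × String))) : List String :=
  let m : PySem.Dict String String := PySem.Dict.mk (match mapping with | some d => d | none => [])
  asr_truecase_loop m tokens false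

-- ===== PORT B =====
-- m.get(t.lower(), t) if t else t
def pvBase (m : PySem.Dict String String) (t : String) : String :=
  if t = "" then t else (m.get? (PySem.Str.lower t)).getD t

-- next(((i, t) for i, t in enumerate(tokens) if any(c.isalpha() for c in t)), None)
def pvFindAlpha : List String → Option (Nat × String)
  | [] => none
  | t :: rest => if pvHasAlpha t then some (0, t) else (pvFindAlpha rest).map (fun p => (p.1 + 1, p.2))

def asr_truecase_alt (tokens : List String) (mapping : Option (List (String × String))) : List String :=
  let m : PySem.Dict String String := PySem.Dict.mk (match mapping with | some d => d | none => [])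
  let res := tokens.map (pvBase m)
  match pvFindAlpha tokens with
  | none => res
  | some (i, t) =>
    if (m.get? (PySem.Str.lower t)).isSome then res else res.set i (pvTitle t)

-- ===== PRECONDITION & SPEC =====
def Spec_asr_truecase (tokens : List String) (mapping : Option (List (String × String))) (out : List String) : Prop := out = asr_truecase_alt tokens mapping
instance (tokens : List String) (mapping : Option (List (String × String))) (out : List String) : Decidable (Spec_asr_truecase tokens mapping out) := by unfold Spec_asr_truecase; infer_instance

-- ===== CLAIM (what is proved, stated in full; the proofs are below) =====
def Claim_equal_asr_truecase : Prop := ∀ (tokens : List String) (mapping : Option (List (String × String))), Dom_asr_truecase tokens mapping → Spec_asr_truecase tokens mapping (asr_truecase tokens mapping)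

-- ===== LEMMAS AND PROOFS =====

lemma match_getD (o : Option String) (t : String) :
    (match o with | some v => v | none => t) = o.getD t := by
  cases o <;> rfl

-- flag set: A is the stateless base map
lemma loop_done (m : PySem.Dict String String) (xs : List String) :
    asr_truecase_loop m xs true = xs.map (pvBase m) := by
  induction xs with
  | nil => rfl
  | cons tok rest ih =>
    simp only [asr_truecase_loop, List.map, pvBase, ih]
    by_cases he : tok = ""
    · simp [he]
    · simp only [he, if_false, Bool.not_true, Bool.false_and, Bool.false_eq_true, if_false,
        ite_self]
      cases m.get? (PySem.Str.lower tok) <;> simp [ih]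

-- flag clear: A is the base map post-patched at the first alphabetic token
lemma loop_pending (m : PySem.Dict String String) (xs : List String) :
    asr_truecase_loop m xs false =
      (match pvFindAlpha xs with
       | none => xs.map (pvBase m)
       | some (i, t) =>
         if (m.get? (PySem.Str.lower t)).isSome then xs.map (pvBase m)
         else (xs.map (pvBase m)).set i (pvTitle t)) := by
  induction xs with
  | nil => rfl
  | cons tok rest ih =>
    simp only [asr_truecase_loop, pvFindAlpha]
    by_cases ha : pvHasAlpha tok
    · have he : tok ≠ "" := by
        intro h; subst h; simp [pvHasAlpha] at ha
      simp only [ha, if_true, he, if_false, Bool.not_false, Bool.true_and, loop_done]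
      cases hg : m.get? (PySem.Str.lower tok) with
      | none => simp [List.map, pvBase, he, hg]
      | some v => simp [List.map, pvBase, he, hg]
    · have hb : pvHasAlpha tok = false := by simpa using ha
      simp only [hb, Bool.false_eq_true, if_false, Bool.and_false, Bool.not_false, ih]
      cases hf : pvFindAlpha rest with
      | none =>
        by_cases he : tok = "" <;>
          simp [he, List.map, pvBase, Option.map, match_getD]
      | some p =>
        obtain ⟨i, t⟩ := p
        by_cases he : tok = ""
        · cases hg : (m.get? (PySem.Str.lower t)).isSome <;>
            simp [he, List.map, pvBase, Option.map, hg]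
        · cases hg : (m.get? (PySem.Str.lower t)).isSome <;>
            simp [he, List.map, pvBase, Option.map, hg, match_getD]

-- ===== VERDICT (by name: the statement is the Claim_ definition above) =====
theorem asr_truecase_spec : Claim_equal_asr_truecase := by
  intro tokens mapping _
  unfold Spec_asr_truecase asr_truecase asr_truecase_alt
  exact loop_pending _ tokens
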